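-- pv_equiv track=rewrite | github.com/zoharbabin/due-diligence-agents | src/dd_agents/search/analyzer.py | _extract_yes_no
-- ===== SOURCE A (Python) =====
-- def _extract_yes_no(answer_upper: str) -> str:
--     """Extract a semantic YES/NO from an uppercased answer string.
--
--     Many LLM answers are free-text that starts with "YES" or "NO" followed by
--     punctuation or a space (e.g. ``"NO - the amendment removed..."``,
--     ``"YES, consent is required per Section 12."``).  For conflict detection we
--     need the categorical signal, not the full text.
--
--     Returns ``"YES"``, ``"NO"``, or the original string if neither is detected.
--     Issue #18.
--     """
--     for keyword in ("YES", "NO"):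
--         if answer_upper == keyword:
--             return keyword
--         # Check if the answer starts with the keyword followed by a
--         # non-alphanumeric character (space, comma, dash, period, etc.).
--         if answer_upper.startswith(keyword) and len(answer_upper) > len(keyword):
--             next_char = answer_upper[len(keyword)]
--             if not next_char.isalnum():
--                 return keyword
--     return answer_upper
-- ===== SOURCE B (Python) =====
-- def _extract_yes_no(answer_upper: str) -> str:
--     """Extract a semantic YES/NO from an uppercased answer string.
--
--     Take the leading alphanumeric token (maximal run of alnum characters
--     from the start); if it is exactly "YES" or "NO", return it, otherwise
--     return the original string.
--     """
--     i = 0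
--     while i < len(answer_upper) and answer_upper[i].isalnum():
--         i += 1
--     token = answer_upper[:i]
--     return token if token in ("YES", "NO") else answer_upper
-- ===== Notes on version B (the rewrite author's own statement) =====
-- stated objective: simpler
-- what changed: Replaces the per-keyword equality/startswith/boundary-char loop with a single leading-alnum-token extraction followed by one membership test against {"YES", "NO"}.
import Mathlib
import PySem

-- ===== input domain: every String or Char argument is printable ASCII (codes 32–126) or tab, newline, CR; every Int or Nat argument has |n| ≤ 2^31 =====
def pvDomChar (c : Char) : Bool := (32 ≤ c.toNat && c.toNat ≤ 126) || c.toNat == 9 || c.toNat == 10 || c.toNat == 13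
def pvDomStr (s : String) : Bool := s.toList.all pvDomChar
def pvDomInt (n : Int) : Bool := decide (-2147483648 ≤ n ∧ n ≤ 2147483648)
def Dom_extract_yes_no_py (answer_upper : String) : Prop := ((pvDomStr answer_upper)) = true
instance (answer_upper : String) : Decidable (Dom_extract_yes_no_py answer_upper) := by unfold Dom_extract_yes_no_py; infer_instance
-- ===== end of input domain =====

-- B replaces A's per-keyword equality/startswith/boundary-char loop by a single
-- leading-alphanumeric-token extraction plus one membership test (objective: simpler).

-- ===== PORT A =====
-- the `for keyword in ("YES", "NO")` loop, one step per keyword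
def pvA_loop (cs : List Char) : List (List Char) → List Char
  | [] => cs
  | kw :: rest =>
    if cs = kw then kw
    else if PySem.Chars.startswith cs kw && decide (kw.length < cs.length) then
      -- next_char = answer_upper[len(keyword)]: in range because of the length guard
      if !(PySem.Chars.isalnum (PySem.List.pyGetD cs (kw.length : Int) ' ')) then kw
      else pvA_loop cs rest
    else pvA_loop cs rest

def extract_yes_no_py (answer_upper : String) : String :=
  String.ofList (pvA_loop answer_upper.toList [['Y', 'E', 'S'], ['N', 'O']])

-- ===== PORT B =====
-- the while loop + answer_upper[:i] slice = the maximal leading alphanumeric run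
def pvB_token (cs : List Char) : List Char := cs.takeWhile PySem.Chars.isalnum

def extract_yes_no_py_alt (answer_upper : String) : String :=
  if pvB_token answer_upper.toList = ['Y', 'E', 'S'] || pvB_token answer_upper.toList = ['N', 'O']
  then String.ofList (pvB_token answer_upper.toList)
  else answer_upper

-- ===== PRECONDITION & SPEC =====
def Spec_extract_yes_no_py (answer_upper : String) (out : String) : Prop := out = extract_yes_no_py_alt answer_upper
instance (answer_upper : String) (out : String) : Decidable (Spec_extract_yes_no_py answer_upper out) := by unfold Spec_extract_yes_no_py; infer_instance

-- ===== CLAIM (what is proved, stated in full; the proofs are below) =====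
def Claim_equal_extract_yes_no_py : Prop := ∀ (answer_upper : String), Dom_extract_yes_no_py answer_upper → Spec_extract_yes_no_py answer_upper (extract_yes_no_py answer_upper)

-- ===== LEMMAS AND PROOFS =====

-- A's keyword loop computes exactly: the leading alnum token if it is YES or NO, else the input.
theorem pvA_loop_eq_token (cs : List Char) :
    pvA_loop cs [['Y', 'E', 'S'], ['N', 'O']] =
      (if pvB_token cs = ['Y', 'E', 'S'] || pvB_token cs = ['N', 'O']
       then pvB_token cs else cs) := by
  have hY : PySem.Chars.isalnum 'Y' = true := by decide
  have hE : PySem.Chars.isalnum 'E' = true := by decide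
  have hS : PySem.Chars.isalnum 'S' = true := by decide
  have hN : PySem.Chars.isalnum 'N' = true := by decide
  have hO : PySem.Chars.isalnum 'O' = true := by decide
  rcases cs with _ | ⟨c1, t1⟩
  · decide
  by_cases h1 : c1 = 'Y'
  · subst h1
    rcases t1 with _ | ⟨c2, t2⟩
    · decide
    by_cases h2 : c2 = 'E'
    · subst h2
      rcases t2 with _ | ⟨c3, t3⟩
      · decide
      by_cases h3 : c3 = 'S'
      · subst h3
        rcases t3 with _ | ⟨c4, t4⟩
        · decide
        have e2 : PySem.List.pyGetD ('Y'::'E'::'S'::c4::t4) 3 ' ' = c4 := by simp [pysem]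
        by_cases h4 : PySem.Chars.isalnum c4 = true
        · have e1 : pvB_token ('Y'::'E'::'S'::c4::t4)
              = 'Y'::'E'::'S'::c4::(t4.takeWhile PySem.Chars.isalnum) := by
            simp [pvB_token, h4, hY, hE, hS]
          rw [e1]
          simp [pvA_loop, PySem.Chars.startswith, List.isPrefixOf, e2, h4]
        · have e1 : pvB_token ('Y'::'E'::'S'::c4::t4) = ['Y','E','S'] := by
            simp [pvB_token, h4, hY, hE, hS]
          rw [e1]
          simp [pvA_loop, PySem.Chars.startswith, List.isPrefixOf, e2, h4]
      · have e1 : ∃ u, pvB_token ('Y'::'E'::c3::t3) = 'Y'::'E'::u ∧ (u = [] ∨ ∃ v, u = c3 :: v) := by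
          by_cases h : PySem.Chars.isalnum c3 = true
          · exact ⟨c3 :: t3.takeWhile PySem.Chars.isalnum,
              by simp [pvB_token, h, hY, hE], Or.inr ⟨_, rfl⟩⟩
          · exact ⟨[], by simp [pvB_token, h, hY, hE], Or.inl rfl⟩
        obtain ⟨u, e1, hu⟩ := e1
        rw [e1]
        rcases hu with rfl | ⟨v, rfl⟩ <;>
          simp [pvA_loop, PySem.Chars.startswith, List.isPrefixOf, h3, Ne.symm h3]
    · have e1 : ∃ u, pvB_token ('Y'::c2::t2) = 'Y'::u ∧ (u = [] ∨ ∃ v, u = c2 :: v) := by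
        by_cases h : PySem.Chars.isalnum c2 = true
        · exact ⟨c2 :: t2.takeWhile PySem.Chars.isalnum,
            by simp [pvB_token, h, hY], Or.inr ⟨_, rfl⟩⟩
        · exact ⟨[], by simp [pvB_token, h, hY], Or.inl rfl⟩
      obtain ⟨u, e1, hu⟩ := e1
      rw [e1]
      rcases hu with rfl | ⟨v, rfl⟩ <;>
        simp [pvA_loop, PySem.Chars.startswith, List.isPrefixOf, h2, Ne.symm h2]
  by_cases h1' : c1 = 'N'
  · subst h1'
    rcases t1 with _ | ⟨c2, t2⟩
    · decide
    by_cases h2 : c2 = 'O'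
    · subst h2
      rcases t2 with _ | ⟨c3, t3⟩
      · decide
      have e2 : PySem.List.pyGetD ('N'::'O'::c3::t3) 2 ' ' = c3 := by simp [pysem]
      by_cases h3 : PySem.Chars.isalnum c3 = true
      · have e1 : pvB_token ('N'::'O'::c3::t3)
            = 'N'::'O'::c3::(t3.takeWhile PySem.Chars.isalnum) := by
          simp [pvB_token, h3, hN, hO]
        rw [e1]
        simp [pvA_loop, PySem.Chars.startswith, List.isPrefixOf, e2, h3]
      · have e1 : pvB_token ('N'::'O'::c3::t3) = ['N','O'] := by
          simp [pvB_token, h3, hN, hO]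
        rw [e1]
        simp [pvA_loop, PySem.Chars.startswith, List.isPrefixOf, e2, h3]
    · have e1 : ∃ u, pvB_token ('N'::c2::t2) = 'N'::u ∧ (u = [] ∨ ∃ v, u = c2 :: v) := by
        by_cases h : PySem.Chars.isalnum c2 = true
        · exact ⟨c2 :: t2.takeWhile PySem.Chars.isalnum,
            by simp [pvB_token, h, hN], Or.inr ⟨_, rfl⟩⟩
        · exact ⟨[], by simp [pvB_token, h, hN], Or.inl rfl⟩
      obtain ⟨u, e1, hu⟩ := e1
      rw [e1]
      rcases hu with rfl | ⟨v, rfl⟩ <;>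
        simp [pvA_loop, PySem.Chars.startswith, List.isPrefixOf, h2, Ne.symm h2]
  · have e1 : ∃ u, pvB_token (c1::t1) = [] ∨ pvB_token (c1::t1) = c1 :: u := by
      by_cases h : PySem.Chars.isalnum c1 = true
      · exact ⟨t1.takeWhile PySem.Chars.isalnum, Or.inr (by simp [pvB_token, h])⟩
      · exact ⟨[], Or.inl (by simp [pvB_token, h])⟩
    obtain ⟨u, e1 | e1⟩ := e1 <;> rw [e1] <;>
      simp [pvA_loop, PySem.Chars.startswith, List.isPrefixOf, h1, h1', Ne.symm h1, Ne.symm h1']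

-- ===== VERDICT (by name: the statement is the Claim_ definition above) =====
theorem extract_yes_no_py_spec : Claim_equal_extract_yes_no_py := by
  intro s _
  unfold Spec_extract_yes_no_py extract_yes_no_py extract_yes_no_py_alt
  rw [pvA_loop_eq_token]
  split_ifs
  · rfl
  · exact String.ofList_toList
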